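-- pv_equiv track=rewrite | github.com/cvdiscover/IDCardIndetification | src/front_correct_skew.py | line_area
-- ===== SOURCE A (Python) =====
-- def line_area(l1, lt_x, rt_x, lt_y, lb_y):
--     """
--     :param l1:轮廓检测后的直线
--     :param lt_x:直线左上端点横坐标
--     :param rt_x:直线右上端点横坐标
--     :param lt_y:直线左上端点纵坐标
--     :param lb_y:直线左下端点纵坐标
--     :return:水平直线和垂直直线
--     """
--     levelline = []
--     vertline = []
--
--     for i in range(0, len(l1)):
--         if l1[i][1] == l1[i][3] or abs(l1[i][1] - l1[i][3]) <= 3: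
--             levelline.append(l1[i])
--         if l1[i][0] == l1[i][2] or abs(l1[i][0] - l1[i][2]) <= 3:
--             vertline.append(l1[i])
--         i += 1
--         if i > len(l1) - 1:
--             break
--
--     # 水平线和接近水平的线
--     # 垂直线和接近垂直的线
--     # 将水平与垂直线分割出来
--
--     # 水平线限制区
--     l_limit = []
--     for i in range(0, len(levelline)):
--         if levelline[i][1] >= lt_y + 6 and levelline[i][1] <= lb_y + 12 \
--                 and levelline[i][0] >= lt_x - 7 and levelline[i][0] <= rt_x + 6:
--             l_limit.append(levelline[i])
--         i += 1
--         if i > len(levelline) - 1: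
--             break
--
--     # 垂直线限制区
--     v_limit = []
--     for j in range(0, len(vertline)):
--         if vertline[j][1] >= lt_y + 6 and vertline[j][1] <= lb_y + 12 \
--                 and vertline[j][0] >= lt_x - 7 and vertline[j][0] <= rt_x + 6:
--             v_limit.append(vertline[j])
--         j += 1
--         if j > len(vertline) - 1:
--             break
--     return l_limit, v_limit
-- ===== SOURCE B (Python) =====
-- def line_area(l1, lt_x, rt_x, lt_y, lb_y):
--     # Single pass: test the bounding region once per line, classify
--     # horizontal/vertical independently; no intermediate orientation lists.
--     l_limit = []
--     v_limit = []
--     for line in l1: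
--         x1, y1, x2, y2 = line[0], line[1], line[2], line[3]
--         in_region = lt_y + 6 <= y1 <= lb_y + 12 and lt_x - 7 <= x1 <= rt_x + 6
--         if in_region:
--             if abs(y1 - y2) <= 3:
--                 l_limit.append(line)
--             if abs(x1 - x2) <= 3:
--                 v_limit.append(line)
--     return l_limit, v_limit
-- ===== Notes on version B (the rewrite author's own statement) =====
-- stated objective: simpler
-- what changed: Replaces A's three index-driven passes (build levelline and vertline, then re-filter each by the region) with one pass over l1 that computes the region test once per line and appends directly to the two result lists; the intermediate lists and the dead manual i+=1/break bookkeeping disappear.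
import Mathlib
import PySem

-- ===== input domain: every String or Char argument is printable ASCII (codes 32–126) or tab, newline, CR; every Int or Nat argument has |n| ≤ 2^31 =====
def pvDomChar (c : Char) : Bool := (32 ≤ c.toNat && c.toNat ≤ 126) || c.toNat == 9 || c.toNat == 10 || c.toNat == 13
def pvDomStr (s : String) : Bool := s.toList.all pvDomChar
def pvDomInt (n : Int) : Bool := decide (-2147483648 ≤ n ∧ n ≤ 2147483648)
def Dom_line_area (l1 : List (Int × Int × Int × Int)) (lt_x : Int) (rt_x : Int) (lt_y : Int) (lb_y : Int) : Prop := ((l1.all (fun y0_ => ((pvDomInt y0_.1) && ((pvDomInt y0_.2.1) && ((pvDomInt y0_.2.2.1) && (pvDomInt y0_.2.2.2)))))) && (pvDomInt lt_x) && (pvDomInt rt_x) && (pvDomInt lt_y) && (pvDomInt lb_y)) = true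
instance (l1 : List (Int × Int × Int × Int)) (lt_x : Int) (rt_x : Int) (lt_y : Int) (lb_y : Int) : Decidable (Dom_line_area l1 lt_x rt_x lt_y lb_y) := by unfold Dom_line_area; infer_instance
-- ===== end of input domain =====

-- B replaces A's three filtering passes (two orientation lists, each re-filtered by the region)
-- with one pass over l1 that tests the region once per line and fills both result lists directly.


-- ===== PORT A =====
-- A: two orientation lists built first, then each re-filtered by the bounding region.
-- (A's manual `i += 1; if i > len-1: break` inside each for-loop never changes behaviour:
-- the range iterator rebinds i, and the break only fires after the last element.)
def line_area (l1 : List (Int × Int × Int × Int)) (lt_x : Int) (rt_x : Int) (lt_y : Int) (lb_y : Int) : (List (Int × Int × Int × Int)) × (List (Int × Int × Int × Int)) :=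
  let levelline := l1.foldl (fun acc p =>
    if p.2.1 = p.2.2.2 ∨ (p.2.1 - p.2.2.2).natAbs ≤ 3 then acc ++ [p] else acc) []
  let vertline := l1.foldl (fun acc p =>
    if p.1 = p.2.2.1 ∨ (p.1 - p.2.2.1).natAbs ≤ 3 then acc ++ [p] else acc) []
  let l_limit := levelline.foldl (fun acc p =>
    if p.2.1 ≥ lt_y + 6 ∧ p.2.1 ≤ lb_y + 12 ∧ p.1 ≥ lt_x - 7 ∧ p.1 ≤ rt_x + 6
    then acc ++ [p] else acc) []
  let v_limit := vertline.foldl (fun acc p =>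
    if p.2.1 ≥ lt_y + 6 ∧ p.2.1 ≤ lb_y + 12 ∧ p.1 ≥ lt_x - 7 ∧ p.1 ≤ rt_x + 6
    then acc ++ [p] else acc) []
  (l_limit, v_limit)

-- ===== PORT B =====
-- B: one pass, region tested once per line, both result lists grown directly.
def line_area_alt (l1 : List (Int × Int × Int × Int)) (lt_x : Int) (rt_x : Int) (lt_y : Int) (lb_y : Int) : (List (Int × Int × Int × Int)) × (List (Int × Int × Int × Int)) :=
  l1.foldl (fun acc p =>
    let in_region := lt_y + 6 ≤ p.2.1 ∧ p.2.1 ≤ lb_y + 12 ∧ lt_x - 7 ≤ p.1 ∧ p.1 ≤ rt_x + 6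
    if in_region then
      ((if (p.2.1 - p.2.2.2).natAbs ≤ 3 then acc.1 ++ [p] else acc.1),
       (if (p.1 - p.2.2.1).natAbs ≤ 3 then acc.2 ++ [p] else acc.2))
    else acc) ([], [])

-- ===== PRECONDITION & SPEC =====
def Spec_line_area (l1 : List (Int × Int × Int × Int)) (lt_x : Int) (rt_x : Int) (lt_y : Int) (lb_y : Int) (out : (List (Int × Int × Int × Int)) × (List (Int × Int × Int × Int))) : Prop := out = line_area_alt l1 lt_x rt_x lt_y lb_y
instance (l1 : List (Int × Int × Int × Int)) (lt_x : Int) (rt_x : Int) (lt_y : Int) (lb_y : Int) (out : (List (Int × Int × Int × Int)) × (List (Int × Int × Int × Int))) : Decidable (Spec_line_area l1 lt_x rt_x lt_y lb_y out) := by unfold Spec_line_area; infer_instance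

-- ===== CLAIM =====
def Claim_equal_line_area : Prop := ∀ (l1 : List (Int × Int × Int × Int)) (lt_x : Int) (rt_x : Int) (lt_y : Int) (lb_y : Int), Dom_line_area l1 lt_x rt_x lt_y lb_y → Spec_line_area l1 lt_x rt_x lt_y lb_y (line_area l1 lt_x rt_x lt_y lb_y)

-- ===== LEMMAS AND PROOFS =====

-- A componentwise fold over a pair of accumulators splits into two folds.
theorem foldl_pair {P : Type} (C : P → Prop) [DecidablePred C]
    (f g : List P → P → List P) (l : List P) (a b : List P) :
    l.foldl (fun acc p => if C p then (f acc.1 p, g acc.2 p) else acc) (a, b) =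
    (l.foldl (fun x p => if C p then f x p else x) a,
     l.foldl (fun x p => if C p then g x p else x) b) := by
  induction l generalizing a b with
  | nil => rfl
  | cons p t ih =>
    simp only [List.foldl_cons]
    by_cases h : C p <;> simp only [h, if_pos, if_neg, not_false_iff] <;>
      exact ih _ _
-- A fold appending under two nested Prop tests is a filter by their conjunction.
theorem foldl_if2_eq_filter {P : Type} (C D : P → Prop) [DecidablePred C] [DecidablePred D]
    (l : List P) (a : List P) :
    l.foldl (fun x p => if C p then (if D p then x ++ [p] else x) else x) a =
    a ++ l.filter (fun p => decide (C p ∧ D p)) := by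
  induction l generalizing a with
  | nil => simp
  | cons p t ih =>
    simp only [List.foldl_cons, List.filter_cons]
    by_cases hc : C p <;> by_cases hd : D p <;>
      simp [hc, hd, ih, List.append_assoc]

-- A's orientation test collapses to the abs-only test B uses.
theorem orient_iff (u v : Int) : (u = v ∨ (u - v).natAbs ≤ 3) ↔ (u - v).natAbs ≤ 3 := by
  omega

-- ===== VERDICT =====
theorem line_area_spec : Claim_equal_line_area := by
  intro l1 lt_x rt_x lt_y lb_y _
  show line_area l1 lt_x rt_x lt_y lb_y = line_area_alt l1 lt_x rt_x lt_y lb_y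
  unfold line_area line_area_alt
  simp only [PySem.List.foldl_append_ite_eq_filter, List.nil_append]
  rw [foldl_pair (C := fun p : Int × Int × Int × Int =>
        lt_y + 6 ≤ p.2.1 ∧ p.2.1 ≤ lb_y + 12 ∧ lt_x - 7 ≤ p.1 ∧ p.1 ≤ rt_x + 6)
      (f := fun x p => if (p.2.1 - p.2.2.2).natAbs ≤ 3 then x ++ [p] else x)
      (g := fun x p => if (p.1 - p.2.2.1).natAbs ≤ 3 then x ++ [p] else x),
      foldl_if2_eq_filter, foldl_if2_eq_filter]
  simp only [List.nil_append, List.filter_filter]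
  refine Prod.ext ?_ ?_ <;>
  · refine List.filter_congr ?_
    intro p _
    simp only [orient_iff, ge_iff_le, Bool.decide_and]
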